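-- pv_equiv track=rewrite | github.com/BenPalmer1983/eampa_v3 | examples/bb1/wd/20201023_062330/input/eampa.py | one_space
-- ===== SOURCE A (Python) =====
-- def one_space(line, sep=" "):
--   out = ''
--   indata = 0
--   last_char = None
--   for char in line:
--     if(indata == 1 and char != "'" and last_char != "\\"):
--       out = out + char
--     elif(indata == 1 and char == "'" and last_char != "\\"):
--       out = out + char
--       indata = 0
--     elif(indata == 2 and char != '"' and last_char != "\\"):
--       out = out + char
--     elif(indata == 2 and char == '"' and last_char != "\\"):
--       out = out + char
--       indata = 0
--     elif(indata == 0 and not (char == " " and last_char == " ")):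
--       out = out + char
--     last_char = char
--   return out
-- ===== SOURCE B (Python) =====
-- def one_space(line, sep=" "):
--     first, *rest = line.split(' ')
--     if not rest:
--         return line
--     last = rest.pop()
--     mid = [p for p in rest if p]
--     return ' '.join([first] + mid + [last])
-- ===== Notes on version B (the rewrite author's own statement) =====
-- stated objective: faster
-- what changed: Replaced the per-character state machine (whose quote/escape states are unreachable, since indata is never set to 1 or 2) with a split-on-space/filter/join pipeline: interior empty fields produced by space runs are dropped and the fields rejoined with a single space.
import Mathlib
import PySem

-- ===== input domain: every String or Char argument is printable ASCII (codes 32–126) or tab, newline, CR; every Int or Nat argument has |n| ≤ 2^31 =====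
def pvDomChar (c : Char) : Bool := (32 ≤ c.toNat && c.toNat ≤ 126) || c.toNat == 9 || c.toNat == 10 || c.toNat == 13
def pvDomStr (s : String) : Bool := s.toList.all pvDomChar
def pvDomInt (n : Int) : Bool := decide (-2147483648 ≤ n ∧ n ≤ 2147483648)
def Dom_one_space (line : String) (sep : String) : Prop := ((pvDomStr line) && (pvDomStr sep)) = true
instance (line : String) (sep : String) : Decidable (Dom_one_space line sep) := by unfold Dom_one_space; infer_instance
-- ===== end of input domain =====

-- B replaces A's per-character state machine (whose quote/escape states are unreachable) by a
-- split(' ')/filter/join pipeline; same return value, measured constant-factor speedup in Python.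

-- ===== PORT A =====
-- A's loop state: (out, indata, last_char); one step of the loop body, branches in A's order.
def oneSpaceStep (s : List Char × Int × Option Char) (char : Char) : List Char × Int × Option Char :=
  let out := s.1
  let indata := s.2.1
  let last_char := s.2.2
  if indata = 1 ∧ char ≠ '\'' ∧ last_char ≠ some '\\' then
    (out ++ [char], indata, some char)
  else if indata = 1 ∧ char = '\'' ∧ last_char ≠ some '\\' then
    (out ++ [char], 0, some char)
  else if indata = 2 ∧ char ≠ '"' ∧ last_char ≠ some '\\' then
    (out ++ [char], indata, some char)
  else if indata = 2 ∧ char = '"' ∧ last_char ≠ some '\\' then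
    (out ++ [char], 0, some char)
  else if indata = 0 ∧ ¬(char = ' ' ∧ last_char = some ' ') then
    (out ++ [char], indata, some char)
  else
    (out, indata, some char)

def one_space (line : String) (sep : String) : String :=
  -- out = '' ; indata = 0 ; last_char = None ; for char in line: …  ; return out
  String.ofList (line.toList.foldl oneSpaceStep ([], 0, none)).1

-- ===== PORT B =====
def one_space_alt (line : String) (sep : String) : String :=
  -- first, *rest = line.split(' ')
  match PySem.Chars.splitOn line.toList [' '] with
  | [] => line   -- unreachable: Python's split always returns at least one part
  | first :: rest =>
    if rest = [] then line
    else
      -- last = rest.pop()  (rest is nonempty here, so pop cannot raise; then rest = dropLast)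
      let last := rest.getLastD []
      let rest' := rest.dropLast
      -- mid = [p for p in rest if p]
      let mid := rest'.filter (fun p => !p.isEmpty)
      -- ' '.join([first] + mid + [last])
      String.ofList (PySem.Chars.join [' '] ([first] ++ mid ++ [last]))

-- ===== PRECONDITION & SPEC =====
def Spec_one_space (line : String) (sep : String) (out : String) : Prop := out = one_space_alt line sep
instance (line : String) (sep : String) (out : String) : Decidable (Spec_one_space line sep out) := by unfold Spec_one_space; infer_instance

-- ===== CLAIM (what is proved, stated in full; the proofs are below) =====
def Claim_equal_one_space : Prop := ∀ (line : String) (sep : String), Dom_one_space line sep → Spec_one_space line sep (one_space line sep)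

-- ===== LEMMAS AND PROOFS =====

-- The space-squeezer A actually computes (flag = "last char was a space").
def sqB : Bool → List Char → List Char
  | _, [] => []
  | b, c :: cs => if c = ' ' ∧ b then sqB true cs else c :: sqB (c = ' ') cs

-- Simple recursive characterisation of line.split(' ').
def partsSpec : List Char → List (List Char)
  | [] => [[]]
  | c :: rest => if c = ' ' then [] :: partsSpec rest else (partsSpec rest).modifyHead (c :: ·)

theorem partsSpec_ne_nil (l : List Char) : partsSpec l ≠ [] := by
  induction l with
  | nil => simp [partsSpec]
  | cons c rest ih =>
    simp only [partsSpec]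
    split
    · simp
    · obtain ⟨q, qs, hq⟩ : ∃ q qs, partsSpec rest = q :: qs := by
        cases h : partsSpec rest with
        | nil => exact absurd h ih
        | cons q qs => exact ⟨q, qs, rfl⟩
      simp [hq]

theorem partsSpec_exists_cons (l : List Char) : ∃ q qs, partsSpec l = q :: qs := by
  cases h : partsSpec l with
  | nil => exact absurd h (partsSpec_ne_nil l)
  | cons q qs => exact ⟨q, qs, rfl⟩

theorem partsSpec_space_free (l : List Char) : ∀ p ∈ partsSpec l, ' ' ∉ p := by
  induction l with
  | nil => simp [partsSpec]
  | cons c rest ih =>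
    intro p hp
    simp only [partsSpec] at hp
    by_cases hc : c = ' '
    · simp [hc] at hp
      rcases hp with h | h
      · simp [h]
      · exact ih p h
    · obtain ⟨q, qs, hq⟩ := partsSpec_exists_cons rest
      rw [hq] at hp
      simp [hc, List.modifyHead] at hp
      rcases hp with h | h
      · subst h
        intro hmem
        rcases List.mem_cons.mp hmem with h' | h'
        · exact hc h'.symm
        · exact ih q (hq ▸ List.mem_cons_self) h'
      · exact ih p (hq ▸ List.mem_cons_of_mem q h)

theorem join_partsSpec (l : List Char) : PySem.Chars.join [' '] (partsSpec l) = l := by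
  induction l with
  | nil => simp [partsSpec, PySem.Chars.join_singleton]
  | cons c rest ih =>
    obtain ⟨q, qs, hq⟩ := partsSpec_exists_cons rest
    simp only [partsSpec]
    by_cases hc : c = ' '
    · rw [if_pos hc, hq, PySem.Chars.join_cons_cons]
      rw [hq] at ih
      simp [ih, hc]
    · rw [if_neg hc, hq]
      simp only [List.modifyHead]
      cases qs with
      | nil =>
        rw [PySem.Chars.join_singleton]
        rw [hq, PySem.Chars.join_singleton] at ih
        simp [ih]
      | cons q2 qs2 =>
        rw [PySem.Chars.join_cons_cons]
        rw [hq, PySem.Chars.join_cons_cons] at ih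
        simp only [List.cons_append, ← ih]

-- The fuel-based go of PySem.Chars.splitOn, specialised to sep = [' '].
theorem splitOn_go_spec (fuel : Nat) : ∀ (l cur : List Char) (acc : List (List Char)),
    l.length < fuel →
    PySem.Chars.splitOn.go [' '] fuel l cur acc
      = acc.reverse ++ (partsSpec l).modifyHead (cur.reverse ++ ·) := by
  induction fuel with
  | zero => intro l cur acc h; omega
  | succ f ih =>
    intro l cur acc h
    cases l with
    | nil =>
      simp [PySem.Chars.splitOn.go, partsSpec, List.modifyHead]
    | cons c rest =>
      obtain ⟨q, qs, hq⟩ := partsSpec_exists_cons rest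
      by_cases hc : c = ' '
      · have hpre : List.isPrefixOf [' '] (c :: rest) = true := by simp [hc, List.isPrefixOf]
        rw [PySem.Chars.splitOn.go, if_pos hpre]
        simp only [List.length_cons] at h
        rw [show List.drop [' '].length (c :: rest) = rest by simp]
        rw [ih rest [] (cur.reverse :: acc) (by omega)]
        simp only [partsSpec, if_pos hc, hq, List.modifyHead]
        simp
      · have hpre : List.isPrefixOf [' '] (c :: rest) = false := by
          simp [List.isPrefixOf]; exact fun h' => hc h'.symm
        rw [PySem.Chars.splitOn.go, if_neg (by simp [hpre])]
        simp only [List.length_cons] at h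
        rw [ih rest (c :: cur) acc (by omega)]
        simp only [partsSpec, if_neg hc, hq, List.modifyHead]
        simp

theorem splitOn_eq_partsSpec (l : List Char) :
    PySem.Chars.splitOn l [' '] = partsSpec l := by
  have h := splitOn_go_spec (l.length + 1) l [] [] (by omega)
  rw [PySem.Chars.splitOn] at *
  rw [h]
  obtain ⟨q, qs, hq⟩ := partsSpec_exists_cons l
  simp [hq, List.modifyHead]

-- sqB walks through a space-free block unchanged, ending with flag false (if the block is nonempty).
theorem sqB_false_append (p m : List Char) (hp : ' ' ∉ p) :
    sqB false (p ++ m) = p ++ sqB false m := by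
  induction p with
  | nil => simp
  | cons c p' ih =>
    have hc : c ≠ ' ' := fun h => hp (h ▸ List.mem_cons_self)
    simp [sqB, hc, ih (fun h => hp (List.mem_cons_of_mem c h))]

theorem sqB_true_append (p m : List Char) (hp : ' ' ∉ p) (hne : p ≠ []) :
    sqB true (p ++ m) = p ++ sqB false m := by
  cases p with
  | nil => exact absurd rfl hne
  | cons c p' =>
    have hc : c ≠ ' ' := fun h => hp (h ▸ List.mem_cons_self)
    simp [sqB, hc, sqB_false_append p' m (fun h => hp (List.mem_cons_of_mem c h))]

theorem sqB_nil (b : Bool) : sqB b [] = [] := by cases b <;> rfl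

theorem sqB_true_space_free (p : List Char) (hp : ' ' ∉ p) : sqB true p = p := by
  cases hne : p with
  | nil => rfl
  | cons c p' =>
    rw [← hne, ← List.append_nil p, sqB_true_append p [] hp (by simp [hne]), sqB_nil, List.append_nil]

theorem getLastD_cons_of_ne_nil {α : Type} (p d : α) (l : List α) (h : l ≠ []) :
    (p :: l).getLastD d = l.getLastD d := by
  cases l with
  | nil => exact absurd rfl h
  | cons x xs => simp

-- Core: collapsing the tail parts (each separated by one space) equals keeping the nonempty
-- interior parts plus the final part, rejoined with single spaces.
theorem sqB_true_join (rest : List (List Char)) (hne : rest ≠ [])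
    (hsf : ∀ p ∈ rest, ' ' ∉ p) :
    sqB true (PySem.Chars.join [' '] rest)
      = PySem.Chars.join [' ']
          (rest.dropLast.filter (fun p => !p.isEmpty) ++ [rest.getLastD []]) := by
  induction rest with
  | nil => exact absurd rfl hne
  | cons p ps ih =>
    cases ps with
    | nil =>
      rw [PySem.Chars.join_singleton, sqB_true_space_free p (hsf p List.mem_cons_self)]
      simp [PySem.Chars.join_singleton]
    | cons q qs =>
      have hps : (q :: qs : List (List Char)) ≠ [] := by simp
      have hsf' : ∀ r ∈ q :: qs, ' ' ∉ r := fun r hr => hsf r (List.mem_cons_of_mem p hr)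
      rw [PySem.Chars.join_cons_cons]
      rw [List.dropLast_cons_of_ne_nil hps, getLastD_cons_of_ne_nil p [] (q :: qs) hps]
      by_cases hp : p = []
      · subst hp
        have : sqB true (' ' :: PySem.Chars.join [' '] (q :: qs))
            = sqB true (PySem.Chars.join [' '] (q :: qs)) := by
          simp [sqB]
        simpa [this] using ih hps hsf'
      · rw [List.append_assoc, sqB_true_append p _ (hsf p List.mem_cons_self) hp]
        have hstep : sqB false ([' '] ++ PySem.Chars.join [' '] (q :: qs))
            = ' ' :: sqB true (PySem.Chars.join [' '] (q :: qs)) := by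
          simp [sqB]
        rw [hstep, ih hps hsf']
        have hfil : (p :: (q :: qs).dropLast).filter (fun p => !p.isEmpty)
            = p :: ((q :: qs).dropLast.filter (fun p => !p.isEmpty)) := by
          simp [hp]
        rw [hfil]
        cases hX : (q :: qs).dropLast.filter (fun p => !p.isEmpty) ++ [(q :: qs).getLastD []] with
        | nil => simp at hX
        | cons x xs =>
          rw [List.cons_append, hX, PySem.Chars.join_cons_cons]
          simp

-- A's fold, given indata = 0, appends exactly the squeezed remainder.
theorem foldA_spec (l : List Char) : ∀ (out : List Char) (last : Option Char),
    (l.foldl oneSpaceStep (out, 0, last)).1 = out ++ sqB (decide (last = some ' ')) l := by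
  induction l with
  | nil => intro out last; simp [sqB_nil]
  | cons c cs ih =>
    intro out last
    have hstep : oneSpaceStep (out, 0, last) c
        = (out ++ (if c = ' ' ∧ last = some ' ' then [] else [c]), 0, some c) := by
      simp only [oneSpaceStep]
      rw [if_neg (by simp), if_neg (by simp), if_neg (by simp), if_neg (by simp)]
      by_cases h : c = ' ' ∧ last = some ' '
      · rw [if_neg (by simp [h.1, h.2]), if_pos h]
        simp
      · rw [if_pos (show True ∧ ¬(c = ' ' ∧ last = some ' ') from ⟨trivial, h⟩), if_neg h]
    rw [List.foldl_cons, hstep, ih]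
    by_cases hc : c = ' '
    · by_cases hl : last = some ' '
      · simp [sqB, hc, hl]
      · simp [sqB, hc, hl]
    · have h : ¬(c = ' ' ∧ last = some ' ') := fun h => hc h.1
      simp [sqB, hc]

theorem one_space_eq_sqB (line sep : String) :
    one_space line sep = String.ofList (sqB false line.toList) := by
  rw [one_space, foldA_spec]
  rfl

-- ===== VERDICT (by name: the statement is the Claim_ definition above) =====
theorem one_space_spec : Claim_equal_one_space := by
  intro line sep _
  unfold Spec_one_space one_space_alt
  rw [splitOn_eq_partsSpec]
  have hjoin := join_partsSpec line.toList
  have hsf := partsSpec_space_free line.toList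
  obtain ⟨first, rest, hq⟩ := partsSpec_exists_cons line.toList
  rw [hq] at hjoin hsf ⊢
  cases rest with
  | nil =>
    rw [PySem.Chars.join_singleton] at hjoin
    have hfree := hsf first List.mem_cons_self
    have hsq : sqB false line.toList = line.toList := by
      rw [← hjoin, ← List.append_nil first, sqB_false_append first [] hfree, sqB_nil]
    dsimp only
    rw [if_pos rfl, one_space_eq_sqB, hsq, String.ofList_toList]
  | cons q qs =>
    dsimp only
    rw [if_neg (by simp)]
    rw [one_space_eq_sqB, ← hjoin, PySem.Chars.join_cons_cons]
    have hfirst := hsf first List.mem_cons_self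
    have hsf' : ∀ p ∈ q :: qs, ' ' ∉ p := fun p hp => hsf p (List.mem_cons_of_mem first hp)
    rw [List.append_assoc, sqB_false_append first _ hfirst]
    have hstep : sqB false ([' '] ++ PySem.Chars.join [' '] (q :: qs))
        = ' ' :: sqB true (PySem.Chars.join [' '] (q :: qs)) := by
      simp [sqB]
    rw [hstep, sqB_true_join (q :: qs) (by simp) hsf']
    cases hX : (q :: qs).dropLast.filter (fun p => !p.isEmpty) ++ [(q :: qs).getLastD []] with
    | nil => simp at hX
    | cons x xs =>
      rw [List.singleton_append, List.cons_append, hX, PySem.Chars.join_cons_cons]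
      simp
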